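-- pv_equiv track=rewrite | github.com/ashmax77/F1-pit-strategy-optimization-challenge | solution/train_model.py | _build_age_index_groups
-- ===== SOURCE A (Python) =====
-- def _build_age_index_groups(feature_names):
--     """Map tire -> sorted index list for lap:: and temp:: age buckets."""
--     groups = {
--         "lap": {"SOFT": [], "MEDIUM": [], "HARD": []},
--         "temp": {"SOFT": [], "MEDIUM": [], "HARD": []},
--     }
--     for idx, name in enumerate(feature_names):
--         if name.startswith("lap::") or name.startswith("temp::"):
--             parts = name.split("::")
--             if len(parts) != 3:
--                 continue
--             kind, tire, age_str = parts
--             if tire not in groups.get(kind, {}):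
--                 continue
--             try:
--                 age = int(age_str)
--             except ValueError:
--                 continue
--             groups[kind][tire].append((age, idx))
--
--     ordered = {"lap": {}, "temp": {}}
--     for kind in ("lap", "temp"):
--         for tire in ("SOFT", "MEDIUM", "HARD"):
--             ordered[kind][tire] = [idx for _age, idx in sorted(groups[kind][tire])]
--     return ordered
-- ===== SOURCE B (Python) =====
-- def _build_age_index_groups(feature_names):
--     """Map tire -> sorted index list for lap:: and temp:: age buckets."""
--     # Parse once into a flat stream of (kind, tire, age, idx) records.
--     flat = []
--     for idx, name in enumerate(feature_names):
--         if not (name.startswith("lap::") or name.startswith("temp::")):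
--             continue
--         parts = name.split("::")
--         if len(parts) != 3:
--             continue
--         kind, tire, age_str = parts
--         if kind not in ("lap", "temp") or tire not in ("SOFT", "MEDIUM", "HARD"):
--             continue
--         try:
--             age = int(age_str)
--         except ValueError:
--             continue
--         flat.append((kind, tire, age, idx))
--     # One stable sort by age only: ties keep original (index) order, which is
--     # exactly the (age, idx) order A gets from its per-bucket tuple sorts.
--     flat.sort(key=lambda rec: rec[2])
--     # Single dispatch pass into the pre-created six buckets.
--     ordered = {
--         "lap": {"SOFT": [], "MEDIUM": [], "HARD": []},
--         "temp": {"SOFT": [], "MEDIUM": [], "HARD": []},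
--     }
--     for kind, tire, _age, idx in flat:
--         ordered[kind][tire].append(idx)
--     return ordered
-- ===== Notes on version B (the rewrite author's own statement) =====
-- stated objective: alternative
-- what changed: Instead of accumulating (age, idx) pairs into six per-(kind,tire) buckets during the scan and lexicographically sorting each bucket, B parses once into one flat (kind,tire,age,idx) stream, does a single stable sort keyed on age only (stability reproduces A's (age,idx) tie order because indices arrive increasing), and dispatches the sorted stream into the pre-created buckets.
import Mathlib
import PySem

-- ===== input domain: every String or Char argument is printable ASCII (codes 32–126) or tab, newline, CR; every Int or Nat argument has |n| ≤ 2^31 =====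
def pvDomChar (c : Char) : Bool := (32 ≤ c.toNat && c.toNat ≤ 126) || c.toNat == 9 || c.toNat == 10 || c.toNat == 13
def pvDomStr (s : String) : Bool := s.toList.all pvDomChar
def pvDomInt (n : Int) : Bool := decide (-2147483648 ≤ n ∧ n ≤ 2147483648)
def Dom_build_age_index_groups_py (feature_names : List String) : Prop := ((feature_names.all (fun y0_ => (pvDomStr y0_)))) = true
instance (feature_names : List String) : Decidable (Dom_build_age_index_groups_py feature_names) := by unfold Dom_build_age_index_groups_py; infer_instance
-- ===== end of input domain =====

-- B replaces A's six during-scan (age, idx) bucket accumulators + six per-bucket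
-- lexicographic tuple sorts by: one parse pass into a flat (kind, tire, age, idx)
-- stream, ONE stable sort keyed on age only, then one dispatch pass into the six
-- pre-created buckets (objective: alternative decomposition, same cost).

-- ===== PORT A =====
-- A's nested dict 'groups' has a CONSTANT key structure ({"lap","temp"} × {"SOFT","MEDIUM","HARD"});
-- it is ported as a six-field record, and 'tire not in groups.get(kind, {})' as the corresponding
-- literal membership test on those constant keys.
structure GA where
  ls : List (Int × Int)
  lm : List (Int × Int)
  lh : List (Int × Int)
  ts : List (Int × Int)
  tm : List (Int × Int)
  th : List (Int × Int)

def stepA (g : GA) (x : Int × String) : GA :=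
  if PySem.Str.startswith x.2 "lap::" || PySem.Str.startswith x.2 "temp::" then
    match PySem.Str.split? x.2 "::" with   -- sep "::" ≠ "" so split? is always some
    | some [kind, tire, age_str] =>
      -- 'tire not in groups.get(kind, {}): continue', written as the positive test
      if (if kind == "lap" || kind == "temp" then tire == "SOFT" || tire == "MEDIUM" || tire == "HARD" else false) then
        match PySem.Int.ofStr? age_str with   -- int(age_str); ValueError -> skip
        | some age =>
          if kind == "lap" then
            if tire == "SOFT" then { g with ls := g.ls ++ [(age, x.1)] }
            else if tire == "MEDIUM" then { g with lm := g.lm ++ [(age, x.1)] }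
            else { g with lh := g.lh ++ [(age, x.1)] }
          else
            if tire == "SOFT" then { g with ts := g.ts ++ [(age, x.1)] }
            else if tire == "MEDIUM" then { g with tm := g.tm ++ [(age, x.1)] }
            else { g with th := g.th ++ [(age, x.1)] }
        | none => g
      else g
    | _ => g   -- len(parts) != 3
  else g

-- '[idx for _age, idx in sorted(bucket)]' — Python's tuple sort is lexicographic: sorted2
def sortA (b : List (Int × Int)) : List Int :=
  (PySem.List.sorted2 b Prod.fst Prod.snd).map Prod.snd

def build_age_index_groups_py (feature_names : List String) : List (String × List (String × List Int)) :=
  let g := (PySem.List.enumerate feature_names).foldl stepA ⟨[], [], [], [], [], []⟩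
  [("lap", [("SOFT", sortA g.ls), ("MEDIUM", sortA g.lm), ("HARD", sortA g.lh)]),
   ("temp", [("SOFT", sortA g.ts), ("MEDIUM", sortA g.tm), ("HARD", sortA g.th)])]

-- ===== PORT B =====
def stepF (acc : List (String × String × Int × Int)) (x : Int × String) :
    List (String × String × Int × Int) :=
  if !(PySem.Str.startswith x.2 "lap::" || PySem.Str.startswith x.2 "temp::") then acc
  else
    match PySem.Str.split? x.2 "::" with   -- sep "::" ≠ "" so split? is always some
    | some [kind, tire, age_str] =>
      if !((kind == "lap" || kind == "temp") && (tire == "SOFT" || tire == "MEDIUM" || tire == "HARD")) then acc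
      else
        match PySem.Int.ofStr? age_str with
        | some age => acc ++ [(kind, tire, age, x.1)]
        | none => acc
    | _ => acc

structure GB where
  ls : List Int
  lm : List Int
  lh : List Int
  ts : List Int
  tm : List Int
  th : List Int

-- 'ordered[kind][tire].append(idx)' on the pre-created constant-keyed dict
def stepB (g : GB) (q : String × String × Int × Int) : GB :=
  if q.1 == "lap" then
    if q.2.1 == "SOFT" then { g with ls := g.ls ++ [q.2.2.2] }
    else if q.2.1 == "MEDIUM" then { g with lm := g.lm ++ [q.2.2.2] }
    else if q.2.1 == "HARD" then { g with lh := g.lh ++ [q.2.2.2] }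
    else g
  else if q.1 == "temp" then
    if q.2.1 == "SOFT" then { g with ts := g.ts ++ [q.2.2.2] }
    else if q.2.1 == "MEDIUM" then { g with tm := g.tm ++ [q.2.2.2] }
    else if q.2.1 == "HARD" then { g with th := g.th ++ [q.2.2.2] }
    else g
  else g

def build_age_index_groups_py_alt (feature_names : List String) : List (String × List (String × List Int)) :=
  let flat := (PySem.List.enumerate feature_names).foldl stepF []
  let sortedFlat := PySem.List.sorted flat (fun q => q.2.2.1)   -- flat.sort(key=rec[2]), stable
  let g := sortedFlat.foldl stepB ⟨[], [], [], [], [], []⟩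
  [("lap", [("SOFT", g.ls), ("MEDIUM", g.lm), ("HARD", g.lh)]),
   ("temp", [("SOFT", g.ts), ("MEDIUM", g.tm), ("HARD", g.th)])]

-- ===== PRECONDITION & SPEC =====
def Spec_build_age_index_groups_py (feature_names : List String) (out : List (String × List (String × List Int))) : Prop := out = build_age_index_groups_py_alt feature_names
instance (feature_names : List String) (out : List (String × List (String × List Int))) : Decidable (Spec_build_age_index_groups_py feature_names out) := by unfold Spec_build_age_index_groups_py; infer_instance

-- ===== CLAIM (what is proved, stated in full; the proofs are below) =====
def Claim_equal_build_age_index_groups_py : Prop := ∀ (feature_names : List String), Dom_build_age_index_groups_py feature_names → Spec_build_age_index_groups_py feature_names (build_age_index_groups_py feature_names)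

-- ===== LEMMAS AND PROOFS =====

-- the common guard chain, as one parser (proof-side only)
def parseN (name : String) : Option (String × String × Int) :=
  if PySem.Str.startswith name "lap::" || PySem.Str.startswith name "temp::" then
    match PySem.Str.split? name "::" with
    | some [kind, tire, age_str] =>
      if (if kind == "lap" || kind == "temp" then tire == "SOFT" || tire == "MEDIUM" || tire == "HARD" else false) then
        match PySem.Int.ofStr? age_str with
        | some age => some (kind, tire, age)
        | none => none
      else none
    | _ => none
  else none

def validK (k : String) : Prop := k = "lap" ∨ k = "temp"
def validT (t : String) : Prop := t = "SOFT" ∨ t = "MEDIUM" ∨ t = "HARD"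

def hFlat (x : Int × String) : List (String × String × Int × Int) :=
  match parseN x.2 with
  | some (k, t, a) => [(k, t, a, x.1)]
  | none => []

def hA (k t : String) (x : Int × String) : List (Int × Int) :=
  match parseN x.2 with
  | some (k', t', a) => if k' = k ∧ t' = t then [(a, x.1)] else []
  | none => []

def hB (k t : String) (q : String × String × Int × Int) : List Int :=
  if q.1 = k ∧ q.2.1 = t then [q.2.2.2] else []

def updA (g : GA) (k t : String) (p : Int × Int) : GA :=
  if k = "lap" then
    if t = "SOFT" then { g with ls := g.ls ++ [p] }
    else if t = "MEDIUM" then { g with lm := g.lm ++ [p] }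
    else { g with lh := g.lh ++ [p] }
  else
    if t = "SOFT" then { g with ts := g.ts ++ [p] }
    else if t = "MEDIUM" then { g with tm := g.tm ++ [p] }
    else { g with th := g.th ++ [p] }

def projA (k t : String) (g : GA) : List (Int × Int) :=
  if k = "lap" then (if t = "SOFT" then g.ls else if t = "MEDIUM" then g.lm else g.lh)
  else (if t = "SOFT" then g.ts else if t = "MEDIUM" then g.tm else g.th)

def projB (k t : String) (g : GB) : List Int :=
  if k = "lap" then (if t = "SOFT" then g.ls else if t = "MEDIUM" then g.lm else g.lh)
  else (if t = "SOFT" then g.ts else if t = "MEDIUM" then g.tm else g.th)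

lemma if_bool_and (a b : Bool) : (if a then b else false) = (a && b) := by cases a <;> rfl

lemma parseN_some {n : String} {k t : String} {a : Int} (h : parseN n = some (k, t, a)) :
    validK k ∧ validT t := by
  unfold parseN at h
  by_cases hsw : (PySem.Str.startswith n "lap::" || PySem.Str.startswith n "temp::") = true
  · rw [if_pos hsw] at h
    cases hsp : PySem.Str.split? n "::" with
    | none => rw [hsp] at h; simp at h
    | some parts =>
      rw [hsp] at h
      rcases parts with _ | ⟨k1, _ | ⟨t1, _ | ⟨a1, _ | ⟨r, rest⟩⟩⟩⟩
      · simp at h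
      · simp at h
      · simp at h
      · simp only [] at h
        by_cases hc : ((if k1 == "lap" || k1 == "temp" then t1 == "SOFT" || t1 == "MEDIUM" || t1 == "HARD" else false) : Bool) = true
        · rw [if_pos hc] at h
          cases ho : PySem.Int.ofStr? a1 with
          | none => rw [ho] at h; simp at h
          | some age =>
            rw [ho] at h
            simp only [Option.some.injEq, Prod.mk.injEq] at h
            obtain ⟨rfl, rfl, rfl⟩ := h
            rw [if_bool_and] at hc
            simp only [Bool.and_eq_true, Bool.or_eq_true, beq_iff_eq] at hc
            unfold validK validT
            tauto
        · rw [if_neg hc] at h; simp at h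
      · simp at h
  · rw [if_neg hsw] at h; simp at h

lemma stepA_eq (g : GA) (x : Int × String) :
    stepA g x = match parseN x.2 with
      | some (k, t, a) => updA g k t (a, x.1)
      | none => g := by
  unfold stepA parseN
  by_cases hsw : (PySem.Str.startswith x.2 "lap::" || PySem.Str.startswith x.2 "temp::") = true
  · rw [if_pos hsw, if_pos hsw]
    cases hsp : PySem.Str.split? x.2 "::" with
    | none => rfl
    | some parts =>
      rcases parts with _ | ⟨k1, _ | ⟨t1, _ | ⟨a1, _ | ⟨r, rest⟩⟩⟩⟩
      · rfl
      · rfl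
      · rfl
      · simp only []
        by_cases hc : ((if k1 == "lap" || k1 == "temp" then t1 == "SOFT" || t1 == "MEDIUM" || t1 == "HARD" else false) : Bool) = true
        · rw [if_pos hc, if_pos hc]
          cases ho : PySem.Int.ofStr? a1 with
          | none => rfl
          | some age => simp only [updA, beq_iff_eq]
        · rw [if_neg hc, if_neg hc]
      · rfl
  · rw [if_neg hsw, if_neg hsw]

lemma stepF_eq (acc : List (String × String × Int × Int)) (x : Int × String) :
    stepF acc x = acc ++ hFlat x := by
  unfold stepF hFlat parseN
  by_cases hsw : (PySem.Str.startswith x.2 "lap::" || PySem.Str.startswith x.2 "temp::") = true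
  · rw [if_neg (show ¬ ((!(PySem.Str.startswith x.2 "lap::" || PySem.Str.startswith x.2 "temp::")) = true) by rw [hsw]; decide), if_pos hsw]
    cases hsp : PySem.Str.split? x.2 "::" with
    | none => simp
    | some parts =>
      rcases parts with _ | ⟨k1, _ | ⟨t1, _ | ⟨a1, _ | ⟨r, rest⟩⟩⟩⟩
      · simp
      · simp
      · simp
      · simp only []
        by_cases hc : ((k1 == "lap" || k1 == "temp") && (t1 == "SOFT" || t1 == "MEDIUM" || t1 == "HARD")) = true
        · rw [if_neg (by rw [hc]; decide), if_pos (by rw [if_bool_and]; exact hc)]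
          cases ho : PySem.Int.ofStr? a1 with
          | none => simp
          | some age => rfl
        · have hc' : ((k1 == "lap" || k1 == "temp") && (t1 == "SOFT" || t1 == "MEDIUM" || t1 == "HARD")) = false := by
            revert hc; cases ((k1 == "lap" || k1 == "temp") && (t1 == "SOFT" || t1 == "MEDIUM" || t1 == "HARD")) <;> simp
          rw [if_pos (by rw [hc']; decide), if_neg (by rw [if_bool_and, hc']; decide)]
          simp
      · simp
  · have hsw' : (PySem.Str.startswith x.2 "lap::" || PySem.Str.startswith x.2 "temp::") = false := by
      revert hsw; cases (PySem.Str.startswith x.2 "lap::" || PySem.Str.startswith x.2 "temp::") <;> simp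
    rw [if_pos (by rw [hsw']; decide), if_neg hsw]
    simp

lemma updA_proj {k t k' t' : String} (hk : validK k) (ht : validT t) (hk' : validK k') (ht' : validT t')
    (g : GA) (p : Int × Int) :
    projA k t (updA g k' t' p) = projA k t g ++ (if k' = k ∧ t' = t then [p] else []) := by
  rcases hk with rfl | rfl <;> rcases ht with rfl | rfl | rfl <;>
    rcases hk' with rfl | rfl <;> rcases ht' with rfl | rfl | rfl <;> simp [projA, updA]

lemma stepA_proj {k t : String} (hk : validK k) (ht : validT t) (g : GA) (x : Int × String) :
    projA k t (stepA g x) = projA k t g ++ hA k t x := by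
  rw [stepA_eq]; unfold hA
  cases hp : parseN x.2 with
  | none => simp
  | some r =>
    obtain ⟨k', t', a⟩ := r
    have hv := parseN_some hp
    exact updA_proj hk ht hv.1 hv.2 g (a, x.1)

lemma stepB_proj {k t : String} (hk : validK k) (ht : validT t) (g : GB)
    (q : String × String × Int × Int) (hq : validK q.1 ∧ validT q.2.1) :
    projB k t (stepB g q) = projB k t g ++ hB k t q := by
  obtain ⟨q1, q2, q3, q4⟩ := q
  obtain ⟨hq1, hq2⟩ := hq
  rcases hk with rfl | rfl <;> rcases ht with rfl | rfl | rfl <;>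
    rcases hq1 with rfl | rfl <;> rcases hq2 with rfl | rfl | rfl <;> simp [projB, stepB, hB]

lemma foldl_proj {σ α β : Type} (step : σ → α → σ) (proj : σ → List β) (h : α → List β)
    (l : List α) (hs : ∀ s x, x ∈ l → proj (step s x) = proj s ++ h x) (s : σ) :
    proj (l.foldl step s) = proj s ++ l.flatMap h := by
  induction l generalizing s with
  | nil => simp
  | cons a l ih =>
    simp only [List.foldl_cons, List.flatMap_cons]
    rw [ih (fun s x hx => hs s x (List.mem_cons_of_mem a hx)),
        hs s a (List.mem_cons_self), List.append_assoc]

lemma hFlat_valid {x : Int × String} {q : String × String × Int × Int} (h : q ∈ hFlat x) :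
    validK q.1 ∧ validT q.2.1 := by
  unfold hFlat at h
  cases hp : parseN x.2 with
  | none => rw [hp] at h; simp at h
  | some r =>
    obtain ⟨k', t', a⟩ := r
    rw [hp] at h; simp at h
    subst h
    exact parseN_some hp

lemma hFlat_idx {x : Int × String} {q : String × String × Int × Int} (h : q ∈ hFlat x) :
    q.2.2.2 = x.1 := by
  unfold hFlat at h
  cases hp : parseN x.2 with
  | none => rw [hp] at h; simp at h
  | some r =>
    obtain ⟨k', t', a⟩ := r
    rw [hp] at h; simp at h
    subst h; rfl

lemma hA_eq_filter (k t : String) (x : Int × String) :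
    hA k t x = ((hFlat x).filter (fun q => decide (q.1 = k ∧ q.2.1 = t))).map
      (fun q => (q.2.2.1, q.2.2.2)) := by
  unfold hA hFlat
  cases hp : parseN x.2 with
  | none => simp
  | some r =>
    obtain ⟨k', t', a⟩ := r
    by_cases hc : k' = k ∧ t' = t <;> simp [hc]

lemma flatMap_if_singleton {α β : Type} (P : α → Prop) [DecidablePred P] (f : α → β) (l : List α) :
    l.flatMap (fun q => if P q then [f q] else []) =
      (l.filter (fun q => decide (P q))).map f := by
  induction l with
  | nil => simp
  | cons a l ih => by_cases h : P a <;> simp [h, ih]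

lemma insertBy_congr {α : Type} (b1 b2 : α → α → Bool) (x : α) (ys : List α)
    (h : ∀ y ∈ ys, b1 x y = b2 x y) :
    PySem.List.insertBy b1 x ys = PySem.List.insertBy b2 x ys := by
  induction ys with
  | nil => rfl
  | cons y ys ih =>
    have hy := h y (List.mem_cons_self)
    simp only [PySem.List.insertBy, hy]
    split
    · rfl
    · rw [ih (fun z hz => h z (List.mem_cons_of_mem y hz))]

lemma foldl_insertBy_congr {α : Type} (b1 b2 : α → α → Bool) (l : List α) (acc : List α)
    (hacc : ∀ x ∈ l, ∀ y ∈ acc, b1 x y = b2 x y)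
    (hl : l.Pairwise (fun y x => b1 x y = b2 x y)) :
    l.foldl (fun acc x => PySem.List.insertBy b1 x acc) acc =
      l.foldl (fun acc x => PySem.List.insertBy b2 x acc) acc := by
  induction l generalizing acc with
  | nil => rfl
  | cons a l ih =>
    have hins : PySem.List.insertBy b1 a acc = PySem.List.insertBy b2 a acc :=
      insertBy_congr b1 b2 a acc (hacc a (List.mem_cons_self))
    simp only [List.foldl_cons, hins]
    apply ih
    · intro x hx y hy
      rcases (PySem.List.mem_insertBy b2 a y acc).1 hy with rfl | hy'
      · exact ((List.pairwise_cons.1 hl).1 x hx)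
      · exact hacc x (List.mem_cons_of_mem a hx) y hy'
    · exact (List.pairwise_cons.1 hl).2

-- a stable sort by age on a stream with strictly increasing idx is the sort by (age, idx)
lemma sorted_age_eq_sorted_lex (l : List (String × String × Int × Int))
    (hpw : l.Pairwise (fun a b => a.2.2.2 < b.2.2.2)) :
    PySem.List.sorted l (fun q => q.2.2.1) =
      PySem.List.sorted l (fun q => (toLex (q.2.2.1, q.2.2.2) : ℤ ×ₗ ℤ)) := by
  simp only [PySem.List.sorted, if_neg (by simp : ¬ (false = true))]
  apply foldl_insertBy_congr
  · intro x hx y hy; simp at hy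
  · refine hpw.imp ?_
    intro a b hab
    have : (b.2.2.1 < a.2.2.1) ↔ ((toLex (b.2.2.1, b.2.2.2) : ℤ ×ₗ ℤ) < toLex (a.2.2.1, a.2.2.2)) := by
      rw [Prod.Lex.toLex_lt_toLex]
      constructor
      · exact fun h => Or.inl h
      · rintro (h | ⟨h1, h2⟩)
        · exact h
        · omega
    exact decide_eq_decide.mpr this

-- sorted2 with Int keys is sorted with the lexicographic product key
lemma sorted2_eq_sorted_lex (xs : List (Int × Int)) :
    PySem.List.sorted2 xs Prod.fst Prod.snd =
      PySem.List.sorted xs (fun p => (toLex p : ℤ ×ₗ ℤ)) := by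
  have hb : (fun (a b : Int × Int) => decide (a.1 < b.1) || (!decide (b.1 < a.1) && decide (a.2 < b.2)))
      = (fun (a b : Int × Int) => decide ((toLex a : ℤ ×ₗ ℤ) < toLex b)) := by
    funext a b
    by_cases h1 : a.1 < b.1 <;> by_cases h2 : b.1 < a.1 <;> by_cases h3 : a.2 < b.2 <;>
      simp [Prod.Lex.toLex_lt_toLex, h1, h2, h3] <;> omega
  simp only [PySem.List.sorted2, PySem.List.sorted, if_neg (by simp : ¬ (false = true))]
  rw [hb]

-- the per-bucket equality: A's tuple-sorted bucket = B's dispatched slice of the one sorted stream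
lemma bucket_eq (fn : List String) {k t : String} (hk : validK k) (ht : validT t) :
    sortA (projA k t ((PySem.List.enumerate fn).foldl stepA ⟨[], [], [], [], [], []⟩)) =
      projB k t ((PySem.List.sorted ((PySem.List.enumerate fn).foldl stepF [])
        (fun q => q.2.2.1)).foldl stepB ⟨[], [], [], [], [], []⟩) := by
  have hinitA : projA k t (⟨[], [], [], [], [], []⟩ : GA) = [] := by
    rcases hk with rfl | rfl <;> rcases ht with rfl | rfl | rfl <;> simp [projA]
  have hinitB : projB k t (⟨[], [], [], [], [], []⟩ : GB) = [] := by
    rcases hk with rfl | rfl <;> rcases ht with rfl | rfl | rfl <;> simp [projB]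
  set enum := PySem.List.enumerate fn with henum
  have hflat : enum.foldl stepF [] = enum.flatMap hFlat := by
    have := foldl_proj stepF (fun l => l) hFlat enum (fun s x _ => stepF_eq s x) []
    simpa using this
  rw [hflat]
  set flatl := enum.flatMap hFlat with hflatl
  set S := PySem.List.sorted flatl (fun q => q.2.2.1) with hS
  have hflat_mem : ∀ q ∈ flatl, validK q.1 ∧ validT q.2.1 := by
    intro q hq
    rcases List.mem_flatMap.1 hq with ⟨x, _, hx⟩
    exact hFlat_valid hx
  have hAfold : projA k t (enum.foldl stepA ⟨[], [], [], [], [], []⟩) = enum.flatMap (hA k t) := by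
    have := foldl_proj stepA (projA k t) (hA k t) enum (fun s x _ => stepA_proj hk ht s x) ⟨[], [], [], [], [], []⟩
    rw [this, hinitA, List.nil_append]
  have hP : enum.flatMap (hA k t) =
      (flatl.filter (fun q => decide (q.1 = k ∧ q.2.1 = t))).map (fun q => (q.2.2.1, q.2.2.2)) := by
    rw [hflatl, List.filter_flatMap, List.map_flatMap]
    exact List.flatMap_congr (fun x _ => hA_eq_filter k t x)
  have hpw : flatl.Pairwise (fun a b => a.2.2.2 < b.2.2.2) := by
    rw [hflatl]
    refine List.pairwise_flatMap.2 ⟨?_, ?_⟩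
    · intro x _
      unfold hFlat
      cases parseN x.2 with
      | none => simp
      | some r => obtain ⟨k', t', a⟩ := r; simp
    · refine (PySem.List.pairwise_lt_enumerate fn 0).imp ?_
      intro a b hab p hp q hq
      rw [hFlat_idx hp, hFlat_idx hq]
      exact hab
  have hSlex : S = PySem.List.sorted flatl (fun q => (toLex (q.2.2.1, q.2.2.2) : ℤ ×ₗ ℤ)) :=
    sorted_age_eq_sorted_lex flatl hpw
  have hBfold : projB k t (S.foldl stepB ⟨[], [], [], [], [], []⟩) = S.flatMap (hB k t) := by
    have := foldl_proj stepB (projB k t) (hB k t) S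
      (fun s q hq => stepB_proj hk ht s q (hflat_mem q ((PySem.List.mem_sorted _ _ _ _).1 hq))) ⟨[], [], [], [], [], []⟩
    rw [this, hinitB, List.nil_append]
  have hBfilter : S.flatMap (hB k t) =
      (S.filter (fun q => decide (q.1 = k ∧ q.2.1 = t))).map (fun q => q.2.2.2) := by
    unfold hB
    exact flatMap_if_singleton (fun q => q.1 = k ∧ q.2.1 = t) (fun q => q.2.2.2) S
  have hperm : ((S.filter (fun q => decide (q.1 = k ∧ q.2.1 = t))).map
      (fun q => (q.2.2.1, q.2.2.2))).Perm (enum.flatMap (hA k t)) := by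
    rw [hP]
    exact ((PySem.List.sorted_perm flatl (fun q => q.2.2.1) false).filter _).map _
  have hSne : S.Pairwise (fun a b => a.2.2.2 ≠ b.2.2.2) := by
    have hne : flatl.Pairwise (fun a b => a.2.2.2 ≠ b.2.2.2) := hpw.imp (fun h => ne_of_lt h)
    exact ((PySem.List.sorted_perm flatl (fun q => q.2.2.1) false).pairwise_iff
      (fun h => Ne.symm h)).2 hne
  have hSle : S.Pairwise (fun a b =>
      (toLex (a.2.2.1, a.2.2.2) : ℤ ×ₗ ℤ) ≤ toLex (b.2.2.1, b.2.2.2)) := by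
    rw [hSlex]
    exact PySem.List.sorted_pairwise flatl (fun q => (toLex (q.2.2.1, q.2.2.2) : ℤ ×ₗ ℤ))
  have hSlt : S.Pairwise (fun a b =>
      (toLex (a.2.2.1, a.2.2.2) : ℤ ×ₗ ℤ) < toLex (b.2.2.1, b.2.2.2)) := by
    refine (hSle.and hSne).imp ?_
    rintro a b ⟨hle, hne⟩
    refine lt_of_le_of_ne hle (fun hEq => hne ?_)
    have := (toLex_inj).1 hEq
    exact congrArg Prod.snd this
  have hTpair : (((S.filter (fun q => decide (q.1 = k ∧ q.2.1 = t))).map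
      (fun q => (q.2.2.1, q.2.2.2))).Pairwise
      (fun a b => (toLex a : ℤ ×ₗ ℤ) < toLex b)) :=
    List.pairwise_map.2 (hSlt.filter _)
  have hsorted : PySem.List.sorted (enum.flatMap (hA k t)) (fun p => (toLex p : ℤ ×ₗ ℤ)) =
      (S.filter (fun q => decide (q.1 = k ∧ q.2.1 = t))).map (fun q => (q.2.2.1, q.2.2.2)) :=
    PySem.List.sorted_eq_of_perm_of_pairwise_lt _ _ _ hperm hTpair
  calc sortA (projA k t (enum.foldl stepA ⟨[], [], [], [], [], []⟩))
      = (PySem.List.sorted2 (enum.flatMap (hA k t)) Prod.fst Prod.snd).map Prod.snd := by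
        rw [hAfold, sortA]
    _ = (PySem.List.sorted (enum.flatMap (hA k t)) (fun p => (toLex p : ℤ ×ₗ ℤ))).map Prod.snd := by
        rw [sorted2_eq_sorted_lex]
    _ = ((S.filter (fun q => decide (q.1 = k ∧ q.2.1 = t))).map
          (fun q => (q.2.2.1, q.2.2.2))).map Prod.snd := by rw [hsorted]
    _ = (S.filter (fun q => decide (q.1 = k ∧ q.2.1 = t))).map (fun q => q.2.2.2) := by
        rw [List.map_map]; rfl
    _ = S.flatMap (hB k t) := hBfilter.symm
    _ = projB k t (S.foldl stepB ⟨[], [], [], [], [], []⟩) := hBfold.symm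

lemma builds_eq (fn : List String) :
    build_age_index_groups_py fn = build_age_index_groups_py_alt fn := by
  have h := fun (k t : String) (hk : validK k) (ht : validT t) => bucket_eq fn hk ht
  have e1 := h "lap" "SOFT" (Or.inl rfl) (Or.inl rfl)
  have e2 := h "lap" "MEDIUM" (Or.inl rfl) (Or.inr (Or.inl rfl))
  have e3 := h "lap" "HARD" (Or.inl rfl) (Or.inr (Or.inr rfl))
  have e4 := h "temp" "SOFT" (Or.inr rfl) (Or.inl rfl)
  have e5 := h "temp" "MEDIUM" (Or.inr rfl) (Or.inr (Or.inl rfl))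
  have e6 := h "temp" "HARD" (Or.inr rfl) (Or.inr (Or.inr rfl))
  simp only [projA, projB, String.reduceEq, reduceIte] at e1 e2 e3 e4 e5 e6
  simp only [build_age_index_groups_py, build_age_index_groups_py_alt]
  rw [e1, e2, e3, e4, e5, e6]

-- ===== VERDICT (by name: the statement is the Claim_ definition above) =====
theorem build_age_index_groups_py_spec : Claim_equal_build_age_index_groups_py := by
  intro fn _
  unfold Spec_build_age_index_groups_py
  exact builds_eq fn
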